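-- pv_equiv track=rewrite | github.com/glennliu/Grounded-Segment-Anything | run_ram_ground_sam.py | convert_tags
-- ===== SOURCE A (Python) =====
-- def convert_tags(tags,valid_openset_names):
--     valid_tags = ''
--     valid_tag_list = []
--     tag_list = []
--     for tag in tags.split('.'):
--         tag = tag.strip()
--         if tag not in tag_list: tag_list.append(tag)
--
--     # select valid tags
--     for tag in tag_list:
--         if tag in valid_openset_names and tag not in valid_tag_list:
--             valid_tags += tag + '. '
--             valid_tag_list.append(tag)
--
--     return valid_tags[:-2]
-- ===== SOURCE B (Python) =====
-- def convert_tags(tags, valid_openset_names):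
--     # Inverted algorithm: look each distinct valid name up in the stripped tag
--     # list, keep the found ones with their first-occurrence index, sort by index.
--     stripped = [t.strip() for t in tags.split('.')]
--     pairs = [(stripped.index(name), name)
--              for name in dict.fromkeys(valid_openset_names)
--              if name in stripped]
--     pairs.sort(key=lambda p: p[0])
--     return '. '.join(name for _, name in pairs)
-- ===== Notes on version B (the rewrite author's own statement) =====
-- stated objective: alternative
-- what changed: Inverts the scan: instead of deduping all tags and then filtering them against the valid names (two list-membership passes over the tags), B looks each distinct valid name up in the stripped tag list, records its first-occurrence index, sorts the found (index, name) pairs by index and joins the names; the dedup-then-filter traversal of the tag list disappears.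
import Mathlib
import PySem

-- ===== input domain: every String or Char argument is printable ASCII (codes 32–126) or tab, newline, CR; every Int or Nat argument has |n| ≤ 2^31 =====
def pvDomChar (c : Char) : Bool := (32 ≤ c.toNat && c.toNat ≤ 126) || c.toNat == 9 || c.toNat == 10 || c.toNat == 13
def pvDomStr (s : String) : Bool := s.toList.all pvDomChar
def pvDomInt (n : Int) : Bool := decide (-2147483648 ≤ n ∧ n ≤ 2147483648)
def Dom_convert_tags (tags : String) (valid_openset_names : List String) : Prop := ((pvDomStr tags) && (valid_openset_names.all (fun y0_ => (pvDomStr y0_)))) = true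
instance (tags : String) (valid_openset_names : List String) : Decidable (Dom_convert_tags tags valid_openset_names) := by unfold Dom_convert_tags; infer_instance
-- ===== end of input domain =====

-- B inverts A's scan: instead of deduping the tag list and filtering it against
-- the valid names, B looks each distinct valid name up in the stripped tag list,
-- sorts the found (first-index, name) pairs by index and joins the names (alternative).

-- ===== PORT A =====
def convert_tags (tags : String) (valid_openset_names : List String) : String :=
  -- valid_tags kept as List Char (Python string concatenation, exact on code points)
  let tag_list : List String :=
    ((PySem.Str.split? tags ".").getD []).foldl
      (fun tl tag =>
        if tl.contains (PySem.Str.strip tag) then tl else tl ++ [PySem.Str.strip tag]) []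
  let st : List Char × List String :=
    tag_list.foldl
      (fun s tag =>
        if valid_openset_names.contains tag && !(s.2.contains tag) then
          (s.1 ++ tag.toList ++ ['.', ' '], s.2 ++ [tag])
        else s) ([], [])
  String.ofList (PySem.List.slice st.1 none (some (-2)))   -- valid_tags[:-2]

-- ===== PORT B =====
def convert_tags_alt (tags : String) (valid_openset_names : List String) : String :=
  let stripped : List String :=
    ((PySem.Str.split? tags ".").getD []).map PySem.Str.strip
  -- [(stripped.index(name), name) for name in dict.fromkeys(valid_openset_names) if name in stripped]
  let pairs : List (Int × String) :=
    ((PySem.List.dedup valid_openset_names).filter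
        (fun name => stripped.contains name)).map
      (fun name => ((((PySem.List.index? stripped name).getD 0 : Nat) : Int), name))
  -- pairs.sort(key=lambda p: p[0])
  let sortedPairs := PySem.List.sorted pairs (fun p => p.1) false
  PySem.Str.join ". " (sortedPairs.map (fun p => p.2))

-- ===== PRECONDITION & SPEC =====
def Spec_convert_tags (tags : String) (valid_openset_names : List String) (out : String) : Prop := out = convert_tags_alt tags valid_openset_names
instance (tags : String) (valid_openset_names : List String) (out : String) : Decidable (Spec_convert_tags tags valid_openset_names out) := by unfold Spec_convert_tags; infer_instance

-- ===== CLAIM (what is proved, stated in full; the proofs are below) =====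
def Claim_equal_convert_tags : Prop := ∀ (tags : String) (valid_openset_names : List String), Dom_convert_tags tags valid_openset_names → Spec_convert_tags tags valid_openset_names (convert_tags tags valid_openset_names)

-- ===== LEMMAS AND PROOFS =====

-- the tags A's second loop selects: valid and not yet selected, in order
def pvSel (valid seen : List String) : List String → List String
  | [] => []
  | t :: ts =>
    if valid.contains t && !(seen.contains t) then t :: pvSel valid (seen ++ [t]) ts
    else pvSel valid seen ts

def pvChunk (t : String) : List Char := t.toList ++ ['.', ' ']

-- A's first loop (dedup keeping first occurrences) is set(…) insertion order
theorem pvFold1_eq_ofList (l : List String) :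
    l.foldl (fun tl t => if tl.contains t then tl else tl ++ [t]) []
      = PySem.Set.ofList l := by
  rw [PySem.Set.ofList_eq_foldl]
  rfl

-- A's second loop, both accumulators at once
theorem pvFold2_eq (valid : List String) (l : List String) (vt : List Char) (vtl : List String) :
    l.foldl
      (fun (s : List Char × List String) tag =>
        if valid.contains tag && !(s.2.contains tag) then
          (s.1 ++ tag.toList ++ ['.', ' '], s.2 ++ [tag])
        else s) (vt, vtl)
      = (vt ++ (pvSel valid vtl l).flatMap pvChunk, vtl ++ pvSel valid vtl l) := by
  induction l generalizing vt vtl with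
  | nil => simp [pvSel]
  | cons t ts ih =>
    rw [List.foldl_cons]
    simp only [pvSel]
    cases h : (valid.contains t && !(vtl.contains t)) with
    | true =>
      rw [if_pos rfl, if_pos rfl, ih]
      simp [pvChunk, List.flatMap_cons]
    | false =>
      rw [if_neg (by simp), if_neg (by simp)]
      exact ih vt vtl

-- on a duplicate-free list the seen-accumulator never changes a later test
theorem pvSel_nodup (valid : List String) (l seen : List String) (hl : l.Nodup) :
    pvSel valid seen l = l.filter (fun t => valid.contains t && !(seen.contains t)) := by
  induction l generalizing seen with
  | nil => simp [pvSel]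
  | cons t ts ih =>
    have hnd := (List.nodup_cons.mp hl)
    simp only [pvSel, List.filter_cons]
    cases h : (valid.contains t && !(seen.contains t)) with
    | true =>
      rw [if_pos rfl, if_pos (by simp)]
      congr 1
      rw [ih (seen ++ [t]) hnd.2]
      refine List.filter_congr ?_
      intro x hx
      have hxt : x ≠ t := fun he => hnd.1 (he ▸ hx)
      have : (seen ++ [t]).contains x = seen.contains x := by
        simp [List.contains_eq_mem, hxt]
      rw [this]
    | false =>
      rw [if_neg (by simp), if_neg (by simp)]
      exact ih seen hnd.2

-- first-occurrence indices are strictly increasing along set(l)'s order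
theorem pvOfList_pairwise_index (l : List String) :
    (PySem.Set.ofList l).Pairwise
      (fun a b => (PySem.List.index? l a).getD 0 < (PySem.List.index? l b).getD 0) := by
  induction l with
  | nil => simp [PySem.Set.ofList_nil]
  | cons x xs ih =>
    rw [PySem.Set.ofList_cons]
    constructor
    · intro y hy
      have hmem := (PySem.Set.mem_discard _ _ _).mp hy
      have hyx : x ≠ y := fun he => hmem.2 he.symm
      have hyxs : y ∈ xs := (PySem.Set.mem_ofList _ _).mp hmem.1
      obtain ⟨k, hk⟩ := Option.isSome_iff_exists.mp
        ((PySem.List.index?_isSome_iff _ _).mpr hyxs)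
      rw [PySem.List.index?_cons_self, PySem.List.index?_cons_of_ne xs hyx, hk]
      simp
    · have hsub : (PySem.Set.discard (PySem.Set.ofList xs) x).Sublist (PySem.Set.ofList xs) := by
        unfold PySem.Set.discard
        exact List.filter_sublist
      refine List.Pairwise.imp_of_mem ?_ (ih.sublist hsub)
      intro a b ha hb hr
      have hax : x ≠ a := fun he => (((PySem.Set.mem_discard _ _ _).mp ha).2) he.symm
      have hbx : x ≠ b := fun he => (((PySem.Set.mem_discard _ _ _).mp hb).2) he.symm
      have haxs : a ∈ xs := (PySem.Set.mem_ofList _ _).mp ((PySem.Set.mem_discard _ _ _).mp ha).1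
      have hbxs : b ∈ xs := (PySem.Set.mem_ofList _ _).mp ((PySem.Set.mem_discard _ _ _).mp hb).1
      obtain ⟨ka, hka⟩ := Option.isSome_iff_exists.mp ((PySem.List.index?_isSome_iff _ _).mpr haxs)
      obtain ⟨kb, hkb⟩ := Option.isSome_iff_exists.mp ((PySem.List.index?_isSome_iff _ _).mpr hbxs)
      rw [PySem.List.index?_cons_of_ne xs hax, PySem.List.index?_cons_of_ne xs hbx, hka, hkb]
      rw [hka, hkb] at hr
      simpa using hr

-- A's selected names and B's found names are the same duplicate-free collection
theorem pvNames_perm (stripped valid : List String) :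
    ((PySem.Set.ofList stripped).filter (fun t => valid.contains t)).Perm
      ((PySem.Set.ofList valid).filter (fun n => stripped.contains n)) := by
  refine (List.perm_ext_iff_of_nodup
    ((PySem.Set.nodup_ofList stripped).filter _)
    ((PySem.Set.nodup_ofList valid).filter _)).mpr ?_
  intro a
  simp only [List.mem_filter, PySem.Set.mem_ofList, List.contains_eq_mem, decide_eq_true_eq]
  exact ⟨fun ⟨h1, h2⟩ => ⟨h2, h1⟩, fun ⟨h1, h2⟩ => ⟨h2, h1⟩⟩

-- flatten of chunks = '. '-join plus a trailing '. ' (nonempty case)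
theorem pvFlat_eq_join (t : String) (rest : List String) :
    (t :: rest).flatMap pvChunk
      = PySem.Chars.join ['.', ' '] ((t :: rest).map String.toList) ++ ['.', ' '] := by
  induction rest generalizing t with
  | nil => simp [pvChunk, PySem.Chars.join_singleton]
  | cons u us ih =>
    simp only [List.flatMap_cons, List.map_cons, PySem.Chars.join_cons_cons]
    have h := ih u
    simp only [List.flatMap_cons] at h
    rw [h]
    simp [pvChunk]

-- final step: slicing off the trailing two chars = joining with '. '
theorem pvSlice_eq_join (sel : List String) :
    String.ofList (PySem.List.slice (sel.flatMap pvChunk) none (some (-2)))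
      = PySem.Str.join ". " sel := by
  cases sel with
  | nil =>
    have h0 : PySem.Str.join ". " ([] : List String) = "" := by decide
    rw [h0, PySem.List.slice_to_neg_ofNat _ 2 (by omega)]
    simp
  | cons t rest =>
    rw [pvFlat_eq_join, PySem.List.slice_to_neg_ofNat _ 2 (by omega)]
    have hlen : (PySem.Chars.join ['.', ' '] ((t :: rest).map String.toList) ++ ['.', ' ']).length - 2
        = (PySem.Chars.join ['.', ' '] ((t :: rest).map String.toList)).length := by
      simp
    rw [hlen, List.take_left]
    have hj : (PySem.Str.join ". " (t :: rest)).toList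
        = PySem.Chars.join ['.', ' '] ((t :: rest).map String.toList) := by
      simp [PySem.Str.toList_join]
    rw [← hj, String.ofList_toList]

-- B's sorted pair list, spelled out: A's selected names tagged with their indices
theorem pvSorted_pairs (stripped valid : List String) :
    PySem.List.sorted
        (((PySem.Set.ofList valid).filter (fun n => stripped.contains n)).map
          (fun name => ((((PySem.List.index? stripped name).getD 0 : Nat) : Int), name)))
        (fun p => p.1) false
      = ((PySem.Set.ofList stripped).filter (fun t => valid.contains t)).map
          (fun name => ((((PySem.List.index? stripped name).getD 0 : Nat) : Int), name)) := by
  refine PySem.List.sorted_eq_of_perm_of_pairwise_lt _ _ _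
    ((pvNames_perm stripped valid).map _) ?_
  rw [List.pairwise_map]
  have hsub : ((PySem.Set.ofList stripped).filter (fun t => valid.contains t)).Sublist
      (PySem.Set.ofList stripped) := List.filter_sublist
  refine List.Pairwise.imp ?_ ((pvOfList_pairwise_index stripped).sublist hsub)
  intro a b h
  simpa using h

-- ===== VERDICT (by name: the statement is the Claim_ definition above) =====
theorem convert_tags_spec : Claim_equal_convert_tags := by
  intro tags valid _
  unfold Spec_convert_tags convert_tags convert_tags_alt
  set stripped := ((PySem.Str.split? tags ".").getD []).map PySem.Str.strip with hstr
  have hA1 : ((PySem.Str.split? tags ".").getD []).foldl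
      (fun tl tag => if tl.contains (PySem.Str.strip tag) then tl
                     else tl ++ [PySem.Str.strip tag]) []
      = PySem.Set.ofList stripped := by
    have h := pvFold1_eq_ofList (((PySem.Str.split? tags ".").getD []).map PySem.Str.strip)
    rw [List.foldl_map] at h
    exact h
  simp only [hA1, PySem.List.dedup_eq_ofList]
  rw [pvFold2_eq valid (PySem.Set.ofList stripped) [] []]
  simp only [List.nil_append]
  rw [pvSel_nodup valid _ [] (PySem.Set.nodup_ofList stripped)]
  rw [pvSorted_pairs stripped valid, pvSlice_eq_join]
  simp [List.map_map, Function.comp_def]
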